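-- pv_equiv track=rewrite | github.com/kkr010128/codebert | problem236/problem236_26.py | solve
-- ===== SOURCE A (Python) =====
-- def solve(s):
--     n = len(s)
--     if n % 2 == 1:
--         return False
--     for i in range(0, n, 2):
--         if s[i:i+2] != 'hi':
--             return False
--     return True
-- ===== SOURCE B (Python) =====
-- def solve(s):
--     # single char-by-char pass with an alternating expected-character state
--     expect_h = True
--     for c in s:
--         if c != ('h' if expect_h else 'i'):
--             return False
--         expect_h = not expect_h
--     return expect_h
-- ===== Notes on version B (the rewrite author's own statement) =====
-- stated objective: alternative
-- what changed: Replaces the even-length guard plus stepped loop over 2-character slices with a single character-by-character scan carrying an alternating expected-character state (the final state doubles as the parity check).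
import Mathlib
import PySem

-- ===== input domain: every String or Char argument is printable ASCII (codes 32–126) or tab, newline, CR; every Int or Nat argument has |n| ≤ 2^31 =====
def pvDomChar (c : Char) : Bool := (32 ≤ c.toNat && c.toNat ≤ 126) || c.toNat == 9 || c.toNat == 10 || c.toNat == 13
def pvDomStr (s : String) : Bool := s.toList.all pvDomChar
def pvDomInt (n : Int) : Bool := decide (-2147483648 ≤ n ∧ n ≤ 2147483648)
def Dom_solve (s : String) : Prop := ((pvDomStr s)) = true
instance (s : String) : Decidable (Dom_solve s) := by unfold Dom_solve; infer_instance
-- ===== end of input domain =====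

-- B replaces A's even-length guard + stepped loop over 2-char slices by one char-by-char
-- scan with an alternating expected-character state (objective: alternative decomposition).

-- ===== PORT A =====
-- the 'for i in range(0, n, 2)' loop with its early 'return False'
def solveLoop (cs : List Char) : List Int → Bool
  | [] => true
  | i :: rest =>
    if PySem.List.slice cs (some i) (some (i + 2)) ≠ ['h', 'i'] then false
    else solveLoop cs rest

def solve (s : String) : Bool :=
  let cs := s.toList
  let n : Int := cs.length
  if n % 2 == 1 then false
  else solveLoop cs (PySem.List.pyRange 0 n 2)

-- ===== PORT B =====
def altLoop : List Char → Bool → Bool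
  | [], e => e
  | c :: rest, e =>
    if c ≠ (if e then 'h' else 'i') then false
    else altLoop rest (!e)

def solve_alt (s : String) : Bool := altLoop s.toList true

-- ===== PRECONDITION & SPEC =====
def Spec_solve (s : String) (out : Bool) : Prop := out = solve_alt s
instance (s : String) (out : Bool) : Decidable (Spec_solve s out) := by unfold Spec_solve; infer_instance

-- ===== CLAIM (what is proved, stated in full; the proofs are below) =====
def Claim_equal_solve : Prop := ∀ (s : String), Dom_solve s → Spec_solve s (solve s)

-- ===== LEMMAS AND PROOFS =====

theorem pyRange_two_nil (a b : Int) (h : b ≤ a) : PySem.List.pyRange a b 2 = [] := by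
  rw [PySem.List.pyRange_of_pos a b (by norm_num)]
  simp [show ¬ a < b by omega]

theorem pyRange_two_cons (a b : Int) (h : a < b) :
    PySem.List.pyRange a b 2 = a :: PySem.List.pyRange (a + 2) b 2 := by
  rw [PySem.List.pyRange_of_pos a b (by norm_num),
      PySem.List.pyRange_of_pos (a + 2) b (by norm_num)]
  have hcnt : ((b - a + 2 - 1) / 2).toNat =
      (if a + 2 < b then ((b - (a + 2) + 2 - 1) / 2).toNat else 0) + 1 := by
    split_ifs with h2 <;> omega
  rw [if_pos h, hcnt, List.range_succ_eq_map]
  simp only [List.map_cons, List.map_map, Nat.cast_zero, mul_zero, add_zero]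
  congr 1
  apply List.map_congr_left
  intro k _
  simp only [Function.comp, Nat.succ_eq_add_one]
  push_cast
  ring

theorem altLoop_parity : ∀ (cs : List Char) (e : Bool),
    altLoop cs e = true → cs.length % 2 = (if e then 0 else 1) := by
  intro cs
  induction cs with
  | nil => intro e h; cases e <;> simp_all [altLoop]
  | cons c rest ih =>
    intro e h
    unfold altLoop at h
    by_cases hc : c ≠ (if e then 'h' else 'i')
    · rw [if_pos hc] at h
      exact absurd h (by simp)
    · rw [if_neg hc] at h
      have := ih (!e) h
      cases e <;> simp at this ⊢ <;> omega

theorem loop_eq (cs : List Char) : ∀ (m j : Nat), cs.length - j = 2 * m → j ≤ cs.length →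
    solveLoop cs (PySem.List.pyRange (j : Int) (cs.length : Int) 2) = altLoop (cs.drop j) true := by
  intro m
  induction m with
  | zero =>
    intro j hm hle
    have hj : j = cs.length := by omega
    rw [pyRange_two_nil _ _ (by exact_mod_cast Nat.le_of_eq hj.symm)]
    simp [solveLoop, hj, altLoop]
  | succ m ih =>
    intro j hm hle
    have hlt : j + 2 ≤ cs.length := by omega
    have hjlt : j < cs.length := by omega
    rw [pyRange_two_cons _ _ (by exact_mod_cast hjlt)]
    have hslice : PySem.List.slice cs (some (j : Int)) (some ((j : Int) + 2)) =
        List.take 2 (List.drop j cs) := by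
      have := PySem.List.slice_natCast_add cs j 2
      push_cast at this
      exact this
    -- drop j cs has length ≥ 2
    obtain ⟨a, b, tl, htl⟩ : ∃ a b tl, cs.drop j = a :: b :: tl := by
      have hlen : (cs.drop j).length = cs.length - j := List.length_drop ..
      match hd : cs.drop j with
      | [] => exact absurd (hd ▸ hlen) (by simp; omega)
      | [a] => exact absurd (hd ▸ hlen) (by simp; omega)
      | a :: b :: tl => exact ⟨a, b, tl, rfl⟩
    have hdrop2 : cs.drop (j + 2) = tl := by
      have : cs.drop (j + 2) = (cs.drop j).drop 2 := by
        rw [List.drop_drop]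
      rw [this, htl]; rfl
    unfold solveLoop
    rw [hslice, htl]
    have hrec : solveLoop cs (PySem.List.pyRange ((j : Int) + 2) (cs.length : Int) 2) =
        altLoop tl true := by
      have := ih (j + 2) (by omega) hlt
      push_cast at this
      rw [← hdrop2]; exact this
    by_cases ha : a = 'h'
    · by_cases hb : b = 'i'
      · simp [ha, hb, altLoop, hrec]
      · simp [ha, hb, altLoop]
    · simp [ha, altLoop]

-- ===== VERDICT (by name: the statement is the Claim_ definition above) =====
theorem solve_spec : Claim_equal_solve := by
  intro s _
  unfold Spec_solve solve solve_alt
  set cs := s.toList with hcs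
  by_cases hodd : cs.length % 2 = 1
  · have h1 : ((cs.length : Int) % 2 == 1) = true := by
      simp only [beq_iff_eq]; omega
    simp only [h1, if_true]
    by_cases h : altLoop cs true = true
    · have := altLoop_parity cs true h
      simp at this; omega
    · simp at h; exact h.symm
  · have h1 : ((cs.length : Int) % 2 == 1) = false := by
      simp only [beq_eq_false_iff_ne, ne_eq]; omega
    simp only [h1]
    have := loop_eq cs (cs.length / 2) 0 (by omega) (by omega)
    simpa using this
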